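-- pv_equiv track=rewrite | github.com/zhebinliu/knowledge-base | backend/services/output_service.py | _format_web_items
-- ===== SOURCE A (Python) =====
-- def _format_web_items(items: list[dict]) -> str:
--     if not items:
--         return ""
--     seen = set()
--     blocks = []
--     for it in items:
--         u = it.get("url", "")
--         if u in seen or not u:
--             continue
--         seen.add(u)
--         title = it.get("title") or "—"
--         snippet = (it.get("snippet") or "").strip()
--         blocks.append(f"[{title}]({u})\n{snippet}")
--         if len(blocks) >= 12:
--             break
--     return "\n\n".join(blocks)
-- ===== SOURCE B (Python) =====
-- def _format_web_items(items: list[dict]) -> str: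
--     if not items:
--         return ""
--     # phase 1: ordered dedup by url (first occurrence wins), no cap here
--     by_url = {}
--     for it in items:
--         u = it.get("url", "")
--         if u and u not in by_url:
--             by_url[u] = it
--     # phase 2: slice the first 12 entries, then format each
--     entries = list(by_url.items())[:12]
--     blocks = [
--         "[{}]({})\n{}".format(it.get("title") or "—", u, (it.get("snippet") or "").strip())
--         for u, it in entries
--     ]
--     return "\n\n".join(blocks)
-- ===== Notes on version B (the rewrite author's own statement) =====
-- stated objective: simpler
-- what changed: Replaces A's fused single loop (set + blocks + early break at 12) with two separate phases: an ordered url->item dict dedup pass, then a [:12] slice formatted by a comprehension.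
import Mathlib
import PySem

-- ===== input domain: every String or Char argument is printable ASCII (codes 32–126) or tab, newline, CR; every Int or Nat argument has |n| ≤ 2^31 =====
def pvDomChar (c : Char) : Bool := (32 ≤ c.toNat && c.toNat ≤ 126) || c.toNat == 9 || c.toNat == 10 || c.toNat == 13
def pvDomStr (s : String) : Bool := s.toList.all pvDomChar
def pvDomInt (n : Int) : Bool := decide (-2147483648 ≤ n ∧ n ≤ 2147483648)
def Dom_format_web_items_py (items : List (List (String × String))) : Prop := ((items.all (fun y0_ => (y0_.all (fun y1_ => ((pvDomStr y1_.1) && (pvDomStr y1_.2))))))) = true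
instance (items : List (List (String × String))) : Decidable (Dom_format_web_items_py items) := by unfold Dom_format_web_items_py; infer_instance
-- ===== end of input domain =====

-- B replaces A's fused dedup+format loop with an early break by two separate phases
-- (ordered url->item dict dedup, then slice-first-12 and format); objective: simpler.


-- shared by both ports: the block text for one item (both Pythons build the same f-string
-- with the same title-or-'—' and stripped-snippet-or-'' rules)
def pvFmt (it : List (String × String)) (u : String) : String :=
  let title := ((PySem.Dict.mk it).get? "title").getD ""
  let title := if title = "" then "—" else title
  let snippet := PySem.Str.strip (((PySem.Dict.mk it).get? "snippet").getD "")
  "[" ++ title ++ "](" ++ u ++ ")\n" ++ snippet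

-- ===== PORT A =====
-- A's single loop: skip falsy/seen urls, append a formatted block, break at 12 blocks
def pvLoopA : List (List (String × String)) → PySem.Set String → List String → List String
  | [], _, blocks => blocks
  | it :: rest, seen, blocks =>
    let u := ((PySem.Dict.mk it).get? "url").getD ""
    if PySem.Set.contains seen u || u == "" then
      pvLoopA rest seen blocks
    else
      let blocks' := blocks ++ [pvFmt it u]
      if 12 ≤ blocks'.length then blocks'
      else pvLoopA rest (PySem.Set.add seen u) blocks'

def format_web_items_py (items : List (List (String × String))) : String :=
  if items = [] then ""
  else PySem.Str.join "\n\n" (pvLoopA items PySem.Set.empty [])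

-- ===== PORT B =====
-- B phase 1: ordered dedup by url into a dict (first occurrence wins), no cap
def pvDedupB : List (List (String × String)) → PySem.Dict String (List (String × String)) → PySem.Dict String (List (String × String))
  | [], d => d
  | it :: rest, d =>
    let u := ((PySem.Dict.mk it).get? "url").getD ""
    if u != "" && !(d.contains u) then pvDedupB rest (d.insert u it)
    else pvDedupB rest d

def format_web_items_py_alt (items : List (List (String × String))) : String :=
  if items = [] then ""
  else
    let entries := PySem.List.slice (pvDedupB items PySem.Dict.empty).items none (some 12)
    PySem.Str.join "\n\n" (entries.map (fun p => pvFmt p.2 p.1))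

-- ===== PRECONDITION & SPEC =====
def Spec_format_web_items_py (items : List (List (String × String))) (out : String) : Prop := out = format_web_items_py_alt items
instance (items : List (List (String × String))) (out : String) : Decidable (Spec_format_web_items_py items out) := by unfold Spec_format_web_items_py; infer_instance

-- ===== CLAIM (what is proved, stated in full; the proofs are below) =====
def Claim_equal_format_web_items_py : Prop := ∀ (items : List (List (String × String))), Dom_format_web_items_py items → Spec_format_web_items_py items (format_web_items_py items)

-- ===== LEMMAS AND PROOFS =====

-- the dedup pass only appends entries
theorem pvDedupB_prefix (rest : List (List (String × String)))
    (d : PySem.Dict String (List (String × String))) :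
    ∃ s, (pvDedupB rest d).items = d.items ++ s := by
  induction rest generalizing d with
  | nil => exact ⟨[], by simp [pvDedupB]⟩
  | cons it rest ih =>
    simp only [pvDedupB]
    split
    · rename_i h
      obtain ⟨s, hs⟩ := ih (d.insert (((PySem.Dict.mk it).get? "url").getD "") it)
      refine ⟨(((PySem.Dict.mk it).get? "url").getD "", it) :: s, ?_⟩
      have hnc : d.contains (((PySem.Dict.mk it).get? "url").getD "") = false := by
        simp only [Bool.and_eq_true, bne_iff_ne, Bool.not_eq_true'] at h
        exact h.2
      rw [hs, PySem.Dict.insert, hnc]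
      simp
    · exact ih d

-- core invariant: A's loop with k blocks already emitted equals B's dedup-then-take-12,
-- provided blocks mirrors d.items and seen mirrors d's keys
theorem pvLoop_eq (rest : List (List (String × String)))
    (seen : PySem.Set String) (d : PySem.Dict String (List (String × String)))
    (hseen : ∀ v, PySem.Set.contains seen v = d.contains v)
    (hlen : d.items.length < 12) :
    pvLoopA rest seen (d.items.map (fun p => pvFmt p.2 p.1)) =
      ((pvDedupB rest d).items.take 12).map (fun p => pvFmt p.2 p.1) := by
  induction rest generalizing seen d with
  | nil =>
    simp [pvLoopA, pvDedupB, List.take_of_length_le (Nat.le_of_lt hlen)]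
  | cons it rest ih =>
    simp only [pvLoopA, pvDedupB]
    set u := ((PySem.Dict.mk it).get? "url").getD "" with hu
    by_cases hskip : (PySem.Set.contains seen u || u == "") = true
    · have hB : (u != "" && !(d.contains u)) = false := by
        rcases Bool.or_eq_true_iff.mp hskip with h | h
        · have hd : d.contains u = true := by rw [← hseen u]; exact h
          simp [hd]
        · simp [bne, h]
      rw [if_pos hskip, if_neg (by simp [hB])]
      exact ih seen d hseen hlen
    · have hskip0 := hskip
      simp only [Bool.or_eq_true, not_or, Bool.not_eq_true] at hskip
      obtain ⟨hns, hne⟩ := hskip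
      have hne' : u ≠ "" := by simpa using hne
      have hnc : d.contains u = false := by rw [← hseen u]; exact hns
      have hB : (u != "" && !(d.contains u)) = true := by simp [hnc, hne']
      rw [if_neg hskip0, if_pos hB]
      have hins : (d.insert u it).items = d.items ++ [(u, it)] := by
        rw [PySem.Dict.insert, hnc]; simp
      have hmap : d.items.map (fun p => pvFmt p.2 p.1) ++ [pvFmt it u] =
          (d.insert u it).items.map (fun p => pvFmt p.2 p.1) := by
        rw [hins]; simp
      by_cases hstop : 12 ≤ (d.items.map (fun p => pvFmt p.2 p.1) ++ [pvFmt it u]).length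
      · rw [if_pos hstop]
        have hlen12 : (d.insert u it).items.length = 12 := by
          have h1 := congrArg List.length hins
          simp only [List.length_append, List.length_singleton] at h1
          simp only [List.length_append, List.length_map, List.length_singleton] at hstop
          omega
        obtain ⟨s, hs⟩ := pvDedupB_prefix rest (d.insert u it)
        rw [hs, ← hlen12, List.take_left, ← hmap]
      · rw [if_neg hstop]
        have hlen' : (d.insert u it).items.length < 12 := by
          have h1 := congrArg List.length hins
          simp only [List.length_append, List.length_singleton] at h1
          simp only [List.length_append, List.length_map, List.length_singleton] at hstop
          omega
        have hseen' : ∀ v, PySem.Set.contains (PySem.Set.add seen u) v = (d.insert u it).contains v := by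
          intro v
          rw [PySem.Set.add, hns]
          simp only [Bool.false_eq_true, if_false]
          rw [PySem.Dict.contains, hins]
          have hs := hseen v
          rw [PySem.Dict.contains] at hs
          by_cases hv : v = u
          · subst hv
            simp [PySem.Set.contains]
          · simp [PySem.Set.contains, hv, Ne.symm hv, ← hs]
        rw [hmap]
        exact ih (PySem.Set.add seen u) (d.insert u it) hseen' hlen'

-- ===== VERDICT (by name: the statement is the Claim_ definition above) =====
theorem format_web_items_py_spec : Claim_equal_format_web_items_py := by
  intro items _
  unfold Spec_format_web_items_py format_web_items_py format_web_items_py_alt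
  by_cases h : items = []
  · simp [h]
  · rw [if_neg h, if_neg h]
    have h12 : PySem.List.slice (pvDedupB items PySem.Dict.empty).items none (some 12) =
        (pvDedupB items PySem.Dict.empty).items.take 12 := by
      have := PySem.List.slice_to_natCast (pvDedupB items PySem.Dict.empty).items 12
      simpa using this
    rw [h12]
    congr 1
    have := pvLoop_eq items PySem.Set.empty PySem.Dict.empty
      (by intro v; simp [PySem.Set.empty, PySem.Set.contains, PySem.Dict.contains, PySem.Dict.empty])
      (by simp [PySem.Dict.empty])
    simpa [PySem.Dict.empty] using this
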